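/- GENERATED by mk_final_copies.py from the proof of the farm's unit `compute_sorted_huffman.2` (farm:compute_sorted_huffman.2.1: Proof.lean) as the
   re-elaboration sweep compiled it — do not edit. -/
import Asan.CheckWalk
import Vorbis.Spec.Units.compute_sorted_huffman_2
import Vorbis.Spec.Worked.compute_sorted_huffman_2_Lemmas

open X86 X86.User Asan Vorbis Vorbis.Spec Vorbis.Spec.compute_sorted_huffman_2

set_option maxRecDepth 4000
set_option maxHeartbeats 4000000

/-- Segment 2 of `compute_sorted_huffman` (`cut6` = 10B324H … `cut9` = 10B3F8H; C lines 1224 – 1227): from `AtSort` to `AtLoop`.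
`qsort(c->sorted_codewords, c->sorted_entries, 4, uint32_compare)` (a contract call: its premise `CmpSpec` is `cmp_ok`), the
sentinel store `c->sorted_codewords[se] = 0xffffffff`, `len := c->sparse ? c->sorted_entries : c->entries`, `i := 0`. Seven check
sites: five fields of `*c` (`check_field`), the sentinel word (`check_sentinel`). The exit assertion is `Common` carried over the
segment's footprint — its stack, the slot of `len`, the `sorted_codewords` block — by `common_carry` (Lemmas.lean), plus the two
new slots `len` and `i`, read back from the walker's memory. -/
theorem Vorbis.Spec.Worked.compute_sorted_huffman_2_ok : Vorbis.Spec.compute_sorted_huffman_2.Statement := by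
  intro Lay hLay μ hμ u₀ hcode hload4 hload8 h_qsort hstore4 hload1 h_u32 others frames Blk ret e u hat
  -- 1. the assertion at the cut point 10B324H (`AtSort` = rip ∧ `Common`), `Mid` inside it, and the entry state's facts
  obtain ⟨hrip, hcom⟩ := hat
  have hcom0 := hcom
  obtain ⟨hmid, hpre, hc, hlengths, hvalues, hfields, hK1, hK2, hK3t, hK4, hzv, hvals, hlens⟩ := hcom
  obtain ⟨he, hrsp, hra, h15, h14, h13, h12, hbp, hbx, hsame, hcodeok, hinv, hun⟩ := hmid
  v_entry he
  have hq := h_qsort others frames L.uint32_compare.entry 4 (cmp_ok others frames (h_u32 others frames))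
  -- 2. the present state under the walker's names
  have w_rip := hrip
  have w_rsp := hrsp
  have w_eq : Mem.EqOn Vorbis.L.textLo Vorbis.L.textHi u₀.mem u.mem := hcodeok
  have hdf : u.flags .df = false := hinv.1
  have hmx : u.mxcsr &&& 0x1F80 = 0x1F80 := hinv.2
  have hsse := Vorbis.sseOK_of_abiInv hinv
  -- `c`, the book's address as a number; `sc`, `n`: its `sorted_codewords` pointer and `sorted_entries`
  obtain ⟨c, hcn⟩ : ∃ c : Nat, (e.reg .rdi).toNat = c := ⟨_, rfl⟩
  have hr : e.reg .rdi = addr c := eq_addr _ _ hcn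
  have w_rbp : u.reg .rbp = addr c := by
    rw [hc, hr]
  obtain ⟨sc, hsc⟩ : ∃ sc : Nat, Codebook.sorted_codewords e.mem c = sc := ⟨_, rfl⟩
  obtain ⟨n, hn⟩ : ∃ n : Nat, (Codebook.sorted_entries e.mem c).toNat = n := ⟨_, rfl⟩
  rw [hcn] at hfields hK1 hK2 hK3t hK4 hzv hvals hlens
  have hsh := hpre.shadow
  have hsp := hsh.rsp
  -- the arithmetic of the precondition: `1 ≤ se ≤ entries < 2^24`
  have hse1 := hpre.se_pos
  have hse2 := hpre.K2.se_le
  have hent := hpre.K1.ent_lt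
  rw [hcn] at hse1 hse2 hent
  have hn1 : 1 ≤ n := by omega
  have hn2 : n < 16777216 := by omega
  have hnse : Codebook.sorted_entries e.mem c = (n : Int) := by omega
  -- where the struct `*c` is: one arithmetic fact
  have hwc := hpre.bookLive.where_ hsh.inv hsh.offText (by decide)
  rw [hcn] at hwc
  simp only [Vorbis.Off.sizeof.Codebook] at hwc
  replace hwc : 1154368 ≤ c ∧ c + 2120 ≤ 12582912 ∧ (c + 2120 ≤ 7340032 ∨ (e.reg .rsp).toNat + 8 ≤ c) := by
    omega
  -- where the block `sorted_codewords[0 .. se]` is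
  have hscB : Blk ⟨sc, 4 * (n + 1)⟩ := by
    have := hpre.K4.sc hpre.se_pos
    rw [hcn, hsc, hn] at this
    exact this
  have hwsc := blk_where hpre.live hsh.inv hsh.offText (by omega) hscB (by simp only; omega)
  simp only [] at hwsc
  replace hwsc : 1154368 ≤ sc ∧ sc + 4 * (n + 1) ≤ 12582912 ∧
      (sc + 4 * (n + 1) ≤ 7340032 ∨ (e.reg .rsp).toNat + 8 ≤ sc) := by
    have e1 : L.textHi = 1154368 := rfl
    omega
  -- it does not meet the struct
  have hdc : sc + 4 * (n + 1) ≤ c ∨ c + 2120 ≤ sc := by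
    have := (sc_apart hpre).1
    rw [hcn] at this
    simp only [scBlock, Block.disjoint, hsc, hn, Vorbis.Off.sizeof.Codebook] at this
    exact this
  have hscLive : LiveIn others frames sc (4 * n) := by
    have := hpre.scLive
    rw [hcn, hsc, hn] at this
    exact this
  -- the two arguments of qsort as numbers
  have ersi : (Word.ofBV (BitVec.signExtend 64 (BitVec.ofNat 32 n))).toNat = n := by
    have e1 := toNat_ofNat32 n (by omega)
    rw [toNat_sext32 _ (by omega), e1]
  have esc : (UInt64.ofNat sc).toNat = sc := toNat_addr sc (by omega)
  -- the address of the sentinel word `sorted_codewords[se]` (`lea rbx, [rbx + rax*4]`)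
  have eaddr : (UInt64.ofNat sc + Word.ofBV (BitVec.signExtend 64 (BitVec.ofNat 32 n)) * 4).toNat = sc + 4 * n := by
    rw [add_mul4 _ _ n ersi (by omega), esc]
  -- the loads of the first part, named
  have r1 : u.mem.readLE (addr c + 2112) 4 = n := by
    simp only [vfield]
    have e1 : Codebook.sorted_entries u.mem c = (n : Int) := by
      rw [hfields.sorted_entries]
      exact hnse
    have e2 : u.mem.i32 (c + 2112) = (n : Int) := e1
    rw [Mem.u32_of_i32_nonneg _ _ (by omega), e2]
    rfl
  have r2 : u.mem.readLE (addr c + 2096) 8 = sc := by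
    simp only [vfield]
    have e1 : Codebook.sorted_codewords u.mem c = sc := by
      rw [hfields.sorted_codewords]
      exact hsc
    exact e1
  -- the sparse byte and `entries`, as the second part loads them
  obtain ⟨sb, hsb⟩ : ∃ sb : Nat, Codebook.sparse e.mem c = sb := ⟨_, rfl⟩
  obtain ⟨en, hen⟩ : ∃ en : Nat, (Codebook.entries e.mem c).toNat = en := ⟨_, rfl⟩
  have r3 : u.mem.readLE (addr c + 27) 1 = sb := by
    simp only [vfield]
    have e1 : Codebook.sparse u.mem c = sb := by
      rw [hfields.sparse]
      exact hsb
    exact e1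
  have hen1 : Codebook.entries e.mem c = (en : Int) := by omega
  have hen2 : en < 16777216 := by omega
  have r4 : u.mem.readLE (addr c + 4) 4 = en := by
    simp only [vfield]
    have e1 : Codebook.entries u.mem c = (en : Int) := by
      rw [hfields.entries]
      exact hen1
    have e2 : u.mem.i32 (c + 4) = (en : Int) := e1
    rw [Mem.u32_of_i32_nonneg _ _ (by omega), e2]
    rfl
  clear hse1 hse2 hent
  -- 3. the first walk: 10B324H … the call of qsort at 10B35CH (stb_vorbis_fixed.c:1224)
  u_walk hcode [hμ.vendor] until [Vorbis.L.compute_sorted_huffman.cut9] span [Vorbis.L.textLo, Vorbis.L.textHi] side (v_side)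
  case check_10b32e =>
    -- 0x10b32e, load4 [c + 0x840] (`c->sorted_entries`): a field of `*c`
    exact check_field hpre hun (by v_untouched) _ 4 2112 (by decide) (by decide) (by u_omega)
  case check_10b343 =>
    -- 0x10b343, load8 [c + 0x830] (`c->sorted_codewords`): a field of `*c`
    exact check_field hpre hun (by v_untouched) _ 8 2096 (by decide) (by decide) (by u_omega)
  case call_inv => v_inv
  case pre_10b35c =>
    -- qsort(sorted_codewords, sext(se), 4, uint32_compare): the `se` records lie inside one live object
    have hun1 : ShadowUntouched u.mem s_10b35c.mem := by v_untouched
    have hun' : ShadowUntouched e.mem s_10b35c.mem := Mem.EqOn.trans hun hun1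
    refine ⟨hsh.call hun' (by u_omega) (by u_omega) (by u_omega), Or.inr ⟨?_, ?_, by decide, ?_, ?_⟩⟩
    · rw [w_rcx]
      rfl
    · rw [w_rdx]
      rfl
    · rw [w_rsi, ersi]
      omega
    · rw [w_rsi, ersi, w_rdi, esc]
      exact hscLive
  -- 4. 10B361H, the returned state of qsort: its footprint as numbers over `u.mem`
  v_after_call w_rsp_10b35c w_mem_10b35c
  simp only [w_rdi_10b35c, w_rsi_10b35c, ersi, esc] at w_same
  -- the fields of `*c` read the same: qsort wrote its stack and `sorted_codewords[0 .. se)` only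
  have q1 : s_10b35cr.mem.readLE (addr c + 2112) 4 = n := by u_frame r1
  have q2 : s_10b35cr.mem.readLE (addr c + 2096) 8 = sc := by u_frame r2
  have q3 : s_10b35cr.mem.readLE (addr c + 27) 1 = sb := by u_frame r3
  have q4 : s_10b35cr.mem.readLE (addr c + 4) 4 = en := by u_frame r4
  -- this segment's footprint so far
  have hS1 : Mem.SameExcept [⟨(e.reg .rsp).toNat - 336, (e.reg .rsp).toNat - 88⟩,
      ⟨(e.reg .rsp).toNat - 80, (e.reg .rsp).toNat - 76⟩, ⟨sc, sc + 4 * (n + 1)⟩] u.mem s_10b35cr.mem := by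
    u_same
  have hun1 : ShadowUntouched u.mem s_10b35cr.mem := by v_untouched
  clear w_same
  -- the values the two arms store into `len`, as numbers
  have e32n : (BitVec.ofNat 32 n).toNat = n := toNat_ofNat32 n (by omega)
  have e32e : (BitVec.ofNat 32 en).toNat = en := toNat_ofNat32 en (by omega)
  have hsb256 : sb < 256 := by
    rw [← hsb]
    exact Mem.u8_lt _ _
  -- 5. the second walk: 10B361H … the cut point 10B3F8H, two arms (stb_vorbis_fixed.c:1225 – 1233)
  u_walk hcode [hμ.vendor] until [Vorbis.L.compute_sorted_huffman.cut9] span [Vorbis.L.textLo, Vorbis.L.textHi] side (v_side)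
  case check_10b364 =>
    -- 0x10b364, load8 [c + 0x830] (`c->sorted_codewords`)
    exact check_field hpre hun (by v_untouched) _ 8 2096 (by decide) (by decide) (by u_omega)
  case check_10b373 =>
    -- 0x10b373, load4 [c + 0x840] (`c->sorted_entries`)
    exact check_field hpre hun (by v_untouched) _ 4 2112 (by decide) (by decide) (by u_omega)
  case check_10b386 =>
    -- 0x10b386, store4 [sorted_codewords + 4·se]: the sentinel word, the last of the block
    refine check_sentinel hpre hun (by v_untouched) _ ?_
    rw [eaddr, hcn, hsc, hn]
  case check_10b395 =>
    -- 0x10b395, load1 [c + 0x1b] (`c->sparse`)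
    exact check_field hpre hun (by v_untouched) _ 1 27 (by decide) (by decide) (by u_omega)
  case check_10b3b8 =>
    -- 0x10b3b8, load4 [c + 4] (`c->entries`), the dense arm
    exact check_field hpre hun (by v_untouched) _ 4 4 (by decide) (by decide) (by u_omega)
  · -- 0x10b3f8 from the dense arm (`je` taken: `c->sparse = 0`): `len = c->entries`
    have hS : Mem.SameExcept [⟨(e.reg .rsp).toNat - 336, (e.reg .rsp).toNat - 88⟩,
        ⟨(e.reg .rsp).toNat - 80, (e.reg .rsp).toNat - 76⟩, ⟨sc, sc + 4 * (n + 1)⟩] u.mem s_10b3b2.mem := by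
      u_same
    have hun2 : ShadowUntouched u.mem s_10b3b2.mem := by v_untouched
    have hinv2 : abiInv s_10b3b2 := by v_inv
    have hrbp : s_10b3b2.reg .rbp = e.reg .rdi := by
      rw [w_kept .rbp rfl]
      exact hc
    have hlen : s_10b3b2.mem.readLE (e.reg .rsp - 80) 4 = en := by u_read
    have hi : s_10b3b2.mem.readLE (e.reg .rsp - 92) 4 = 0 := by u_read
    have hs0 : Codebook.sparse e.mem c = 0 := by omega
    rw [← hsc, ← hn, ← hcn] at hS
    refine ReachVia.done ⟨w_rip, common_carry hcom0 he_room he_top hS w_rsp hrbp w_eq hinv2 hun2, ?_, hi⟩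
    rw [hlen, hcn, Codebook.N_dense hs0, hen]
  · -- 0x10b3f8 from the sparse arm (`c->sparse ≠ 0`): `len = c->sorted_entries`
    have hS : Mem.SameExcept [⟨(e.reg .rsp).toNat - 336, (e.reg .rsp).toNat - 88⟩,
        ⟨(e.reg .rsp).toNat - 80, (e.reg .rsp).toNat - 76⟩, ⟨sc, sc + 4 * (n + 1)⟩] u.mem s_10b3b2.mem := by
      u_same
    have hun2 : ShadowUntouched u.mem s_10b3b2.mem := by v_untouched
    have hinv2 : abiInv s_10b3b2 := by v_inv
    have hrbp : s_10b3b2.reg .rbp = e.reg .rdi := by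
      rw [w_kept .rbp rfl]
      exact hc
    have hlen : s_10b3b2.mem.readLE (e.reg .rsp - 80) 4 = n := by u_read
    have hi : s_10b3b2.mem.readLE (e.reg .rsp - 92) 4 = 0 := by u_read
    have hs1 : Codebook.sparse e.mem c ≠ 0 := by omega
    rw [← hsc, ← hn, ← hcn] at hS
    refine ReachVia.done ⟨w_rip, common_carry hcom0 he_room he_top hS w_rsp hrbp w_eq hinv2 hun2, ?_, hi⟩
    rw [hlen, hcn, Codebook.N_sparse hs1, hn]
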